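-- pv_equiv track=rewrite | github.com/rcls/pin | misc.py | split_twos
-- ===== SOURCE A (Python) =====
-- from typing import Any, Iterator, Tuple
--
-- def split_twos(n: int) -> Tuple[int, int]:
--     d = n
--     s = 0
--     while d & 3 == 0:
--         d >>= 2
--         s += 2
--     if d & 1 == 0:
--         d >>= 1
--         s += 1
--     return d, s
-- ===== SOURCE B (Python) =====
-- def split_twos(n):
--     s = (n & -n).bit_length() - 1
--     return n >> s, s
-- ===== Notes on version B (the rewrite author's own statement) =====
-- stated objective: idiomatic
-- what changed: Replaces A's strip-two-bits-per-iteration while loop with the closed-form lowest-set-bit extraction s = (n & -n).bit_length() - 1 followed by a single shift n >> s.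
-- outside the precondition, e.g. on split_twos(0): A does not finish within the time limit, B raises ValueError
import Mathlib
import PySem

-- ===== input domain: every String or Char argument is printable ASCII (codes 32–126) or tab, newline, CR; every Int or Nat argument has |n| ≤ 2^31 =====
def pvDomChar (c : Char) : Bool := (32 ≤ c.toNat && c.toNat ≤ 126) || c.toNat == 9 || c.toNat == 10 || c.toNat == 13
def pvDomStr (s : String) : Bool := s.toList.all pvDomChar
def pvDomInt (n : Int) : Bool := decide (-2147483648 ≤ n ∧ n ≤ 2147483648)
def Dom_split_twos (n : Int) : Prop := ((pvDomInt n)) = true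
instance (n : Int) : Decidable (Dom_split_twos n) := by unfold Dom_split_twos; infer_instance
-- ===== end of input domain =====

-- B replaces A's strip-two-bits-at-a-time loop by the closed-form lowest-set-bit
-- extraction s = (n & -n).bit_length() - 1; d = n >> s (objective: idiomatic).

-- ===== PORT A =====
-- the while loop; fuel (natAbs n + 1) is a totality guard only: for d ≠ 0 the
-- absolute value strictly shrinks each iteration, so the fuel is never exhausted
def splitLoop : Nat → Int → Int → Int × Int
  | 0, d, s => (d, s)
  | fuel + 1, d, s =>
    if Int.land d 3 = 0 then splitLoop fuel (d >>> (2 : Nat)) (s + 2) else (d, s)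

def split_twos (n : Int) : Int × Int :=
  let p := splitLoop (n.natAbs + 1) n 0
  if Int.land p.1 1 = 0 then (p.1 >>> (1 : Nat), p.2 + 1) else p

-- ===== PORT B =====
-- Python's int.bit_length (argument here is n & -n, never negative; abs matches Python)
def pyBitLength (m : Int) : Int := if m = 0 then 0 else (Nat.log2 m.natAbs : Int) + 1

def split_twos_alt (n : Int) : Int × Int :=
  let s : Int := pyBitLength (Int.land n (-n)) - 1
  (n >>> s.toNat, s)

-- ===== PRECONDITION & SPEC =====
-- Pre_ excludes only n = 0, on which A loops forever (and B raises ValueError)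
def Pre_split_twos (n : Int) : Prop := n ≠ 0
instance (n : Int) : Decidable (Pre_split_twos n) := by unfold Pre_split_twos; infer_instance
def pvWitness_split_twos : Int := (12)

def Spec_split_twos (n : Int) (out : Int × Int) : Prop := out = split_twos_alt n
instance (n : Int) (out : Int × Int) : Decidable (Spec_split_twos n out) := by unfold Spec_split_twos; infer_instance

-- ===== CLAIM (what is proved, stated in full; the proofs are below) =====
def Claim_equal_split_twos : Prop := ∀ (n : Int), Dom_split_twos n → Pre_split_twos n → Spec_split_twos n (split_twos n)

-- ===== LEMMAS AND PROOFS =====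

-- number of trailing zero bits (proof-side helper)
def tz (n : Nat) : Nat :=
  if h : n % 2 = 1 ∨ n = 0 then 0 else tz (n / 2) + 1
termination_by n
decreasing_by omega

lemma tz_spec : ∀ n : Nat, n ≠ 0 → ∃ u, n = 2 ^ tz n * u ∧ u % 2 = 1 := by
  intro n
  induction n using Nat.strong_induction_on with
  | _ n ih =>
    intro hn
    rw [tz]
    split
    · rename_i h
      rcases h with h | h
      · exact ⟨n, by simp, h⟩
      · omega
    · rename_i h
      obtain ⟨u, hu, hodd⟩ := ih (n / 2) (by omega) (by omega)
      refine ⟨u, ?_, hodd⟩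
      rw [pow_succ]
      have hn2 : n = 2 * (n / 2) := by omega
      calc n = 2 * (n / 2) := hn2
        _ = 2 * (2 ^ tz (n / 2) * u) := by rw [← hu]
        _ = 2 ^ tz (n / 2) * 2 * u := by ring

lemma ldiff_eq_zero_iff (a b : Nat) : Nat.ldiff a b = 0 ↔ a &&& b = a := by
  constructor <;> intro h <;> apply Nat.eq_of_testBit_eq <;> intro i
  · have h' := congrArg (fun x => Nat.testBit x i) h
    simp only [Nat.testBit_ldiff, Nat.zero_testBit] at h'
    simp only [Nat.testBit_and]
    cases ha : Nat.testBit a i <;> cases hb : Nat.testBit b i <;> simp_all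
  · have h' := congrArg (fun x => Nat.testBit x i) h
    simp only [Nat.testBit_and] at h'
    simp only [Nat.testBit_ldiff, Nat.zero_testBit]
    cases ha : Nat.testBit a i <;> cases hb : Nat.testBit b i <;> simp_all

lemma nat_and_three (m : Nat) : m &&& 3 = m % 4 := by
  have h := Nat.and_two_pow_sub_one_eq_mod m 2
  norm_num at h
  exact h

lemma nat_and_one (m : Nat) : m &&& 1 = m % 2 := Nat.and_one_is_mod m

lemma land_three (d : Int) : Int.land d 3 = 0 ↔ d % 4 = 0 := by
  cases d with
  | ofNat m =>
    show Int.ofNat (m &&& 3) = 0 ↔ _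
    rw [nat_and_three]
    simp only [Int.ofNat_eq_natCast]
    omega
  | negSucc m =>
    show Int.ofNat (Nat.ldiff 3 m) = 0 ↔ _
    have h1 : Nat.ldiff 3 m = 0 ↔ m % 4 = 3 := by
      rw [ldiff_eq_zero_iff, Nat.and_comm, nat_and_three]
    rw [Int.negSucc_eq]
    simp only [Int.ofNat_eq_natCast]
    omega

lemma land_one (d : Int) : Int.land d 1 = 0 ↔ d % 2 = 0 := by
  cases d with
  | ofNat m =>
    show Int.ofNat (m &&& 1) = 0 ↔ _
    rw [nat_and_one]
    simp only [Int.ofNat_eq_natCast]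
    omega
  | negSucc m =>
    show Int.ofNat (Nat.ldiff 1 m) = 0 ↔ _
    have h1 : Nat.ldiff 1 m = 0 ↔ m % 2 = 1 := by
      rw [ldiff_eq_zero_iff, Nat.and_comm, nat_and_one]
    rw [Int.negSucc_eq]
    simp only [Int.ofNat_eq_natCast]
    omega

lemma shiftRight_two (d : Int) (h : d % 4 = 0) : (d >>> (2 : Nat)) * 4 = d := by
  have h2 := Int.shiftRight_eq_div_pow d 2
  norm_num at h2
  rw [h2]
  exact Int.ediv_mul_cancel (by omega)

lemma shiftRight_one (d : Int) (h : d % 2 = 0) : (d >>> (1 : Nat)) * 2 = d := by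
  have h2 := Int.shiftRight_eq_div_pow d 1
  norm_num at h2
  rw [h2]
  exact Int.ediv_mul_cancel (by omega)

lemma splitLoop_spec : ∀ (fuel : Nat) (d s : Int), d ≠ 0 → d.natAbs ≤ fuel →
    (splitLoop fuel d s).1 ≠ 0 ∧ (splitLoop fuel d s).1 % 4 ≠ 0 ∧
    ∃ k : Nat, (splitLoop fuel d s).2 = s + 2 * (k : Int) ∧
      (splitLoop fuel d s).1 * 4 ^ k = d := by
  intro fuel
  induction fuel with
  | zero => intro d s hd habs; omega
  | succ fuel ih =>
    intro d s hd habs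
    rw [splitLoop]
    split
    · rename_i hland
      have h4 : d % 4 = 0 := (land_three d).mp hland
      set d' := d >>> (2 : Nat) with hd'
      have hmul : d' * 4 = d := shiftRight_two d h4
      have hd'0 : d' ≠ 0 := by intro h; rw [h] at hmul; omega
      have habs' : d'.natAbs ≤ fuel := by
        have h5 : (d' * 4).natAbs = d'.natAbs * 4 := by simp [Int.natAbs_mul]
        omega
      obtain ⟨h1, h2, k, h3, h4'⟩ := ih d' (s + 2) hd'0 habs'
      refine ⟨h1, h2, k + 1, by omega, ?_⟩
      rw [pow_succ, ← mul_assoc, h4', hmul]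
    · rename_i hland
      have h4 : d % 4 ≠ 0 := fun h => hland ((land_three d).mpr h)
      exact ⟨hd, h4, 0, by simp, by simp⟩

-- the canonical "odd part" characterisation both ports satisfy
def GoodP (n : Int) (p : Int × Int) : Prop :=
  p.1 % 2 ≠ 0 ∧ ∃ k : Nat, p.2 = (k : Int) ∧ p.1 * 2 ^ k = n

lemma A_good (n : Int) (hn : n ≠ 0) : GoodP n (split_twos n) := by
  obtain ⟨h1, h2, k, h3, h4⟩ := splitLoop_spec (n.natAbs + 1) n 0 hn (by omega)
  set p := splitLoop (n.natAbs + 1) n 0 with hp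
  show GoodP n (if Int.land p.1 1 = 0 then (p.1 >>> (1 : Nat), p.2 + 1) else p)
  have h4' : p.1 * 2 ^ (2 * k) = n := by
    rw [← h4]
    congr 1
    rw [pow_mul]
    norm_num
  by_cases hland : Int.land p.1 1 = 0
  · rw [if_pos hland]
    have he : p.1 % 2 = 0 := (land_one p.1).mp hland
    have hmul : (p.1 >>> (1 : Nat)) * 2 = p.1 := shiftRight_one p.1 he
    refine ⟨by dsimp; omega, 2 * k + 1, by dsimp; omega, ?_⟩
    show (p.1 >>> (1 : Nat)) * 2 ^ (2 * k + 1) = n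
    rw [pow_succ, ← mul_assoc]
    calc p.1 >>> (1:Nat) * 2 ^ (2 * k) * 2 = (p.1 >>> (1:Nat) * 2) * 2 ^ (2 * k) := by ring
      _ = p.1 * 2 ^ (2 * k) := by rw [hmul]
      _ = n := h4'
  · rw [if_neg hland]
    have he : p.1 % 2 ≠ 0 := fun h => hland ((land_one p.1).mpr h)
    exact ⟨he, 2 * k, by omega, h4'⟩

lemma testBit_one_succ (i : Nat) : Nat.testBit 1 (i + 1) = false := by
  have h := Nat.testBit_succ 1 i
  norm_num at h
  exact h

lemma ldiff_pred : ∀ m : Nat, m ≠ 0 → Nat.ldiff m (m - 1) = 2 ^ tz m := by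
  intro m
  induction m using Nat.strong_induction_on with
  | _ m ih =>
    intro hm
    rw [tz]
    split
    · rename_i h
      have hodd : m % 2 = 1 := by omega
      rw [pow_zero]
      apply Nat.eq_of_testBit_eq
      intro i
      cases i with
      | zero =>
        rw [Nat.testBit_ldiff, Nat.testBit_zero, Nat.testBit_zero, Nat.testBit_zero]
        have he : (m - 1) % 2 = 0 := by omega
        rw [hodd, he]
        decide
      | succ i =>
        rw [Nat.testBit_ldiff, Nat.testBit_succ, Nat.testBit_succ, testBit_one_succ]
        have he : (m - 1) / 2 = m / 2 := by omega
        rw [he]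
        cases Nat.testBit (m / 2) i <;> decide
    · rename_i h
      have h0 : m % 2 = 0 := by omega
      have hm2 : m / 2 ≠ 0 := by omega
      have hIH := ih (m / 2) (by omega) hm2
      apply Nat.eq_of_testBit_eq
      intro i
      cases i with
      | zero =>
        rw [Nat.testBit_ldiff, Nat.testBit_zero, Nat.testBit_two_pow, h0]
        simp
      | succ i =>
        have hq : (m - 1) / 2 = m / 2 - 1 := by omega
        have hbit := congrArg (fun x => Nat.testBit x i) hIH
        simp only [Nat.testBit_ldiff] at hbit
        rw [Nat.testBit_ldiff, Nat.testBit_succ, Nat.testBit_succ, hq, hbit,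
          Nat.testBit_two_pow, Nat.testBit_two_pow]
        simp

lemma land_neg_self (n : Int) (hn : n ≠ 0) :
    Int.land n (-n) = ((2 ^ tz n.natAbs : Nat) : Int) := by
  have key : ∀ m : Nat, Int.land n (-n) = Int.ofNat (Nat.ldiff (m + 1) m) →
      n.natAbs = m + 1 → Int.land n (-n) = ((2 ^ tz n.natAbs : Nat) : Int) := by
    intro m h habs
    have hl := ldiff_pred (m + 1) (by omega)
    rw [Nat.add_sub_cancel] at hl
    rw [h, habs, hl]
    simp
  cases n with
  | ofNat m =>
    cases m with
    | zero => simp at hn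
    | succ m => exact key m rfl rfl
  | negSucc m => exact key m rfl rfl

lemma B_good (n : Int) (hn : n ≠ 0) : GoodP n (split_twos_alt n) := by
  set v := tz n.natAbs with hv
  have hne : ((2 ^ v : Nat) : Int) ≠ 0 := by positivity
  have habs : ((2 ^ v : Nat) : Int).natAbs = 2 ^ v := by simp
  have hbl : pyBitLength (Int.land n (-n)) - 1 = (v : Int) := by
    rw [land_neg_self n hn]
    unfold pyBitLength
    rw [if_neg hne, habs, Nat.log2_two_pow]
    ring
  show GoodP n (n >>> (pyBitLength (Int.land n (-n)) - 1).toNat,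
      pyBitLength (Int.land n (-n)) - 1)
  rw [hbl]
  have htoNat : ((v : Int)).toNat = v := by simp
  rw [htoNat]
  obtain ⟨u, hu, hodd⟩ := tz_spec n.natAbs (by simpa using hn)
  have hdvd : ((2 : Int) ^ v) ∣ n := by
    rw [← Int.natAbs_dvd_natAbs]
    have : ((2:Int) ^ v).natAbs = 2 ^ v := by simp
    rw [this]
    exact ⟨u, hu⟩
  have hshift : (n >>> v) * 2 ^ v = n := by
    rw [Int.shiftRight_eq_div_pow]
    exact Int.ediv_mul_cancel (by exact_mod_cast hdvd)
  refine ⟨?_, v, rfl, hshift⟩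
  dsimp
  intro heven
  obtain ⟨c, hc⟩ : (2 : Int) ∣ (n >>> v) := by omega
  have hna : n.natAbs = 2 ^ v * (2 * c).natAbs := by
    rw [← hshift, Int.natAbs_mul, hc]
    have h2 : ((2:Int) ^ v).natAbs = 2 ^ v := by simp
    rw [h2]
    ring
  have habs2 : (2 * c).natAbs = 2 * c.natAbs := by
    rw [Int.natAbs_mul]
    simp
  have hpow : (0:Nat) < 2 ^ v := by positivity
  have h3 : 2 ^ v * u = 2 ^ v * (2 * c.natAbs) := by rw [← hu, hna, habs2]
  have h4 : u = 2 * c.natAbs := Nat.eq_of_mul_eq_mul_left hpow h3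
  omega

lemma good_unique (n : Int) (p q : Int × Int)
    (hp : GoodP n p) (hq : GoodP n q) : p = q := by
  obtain ⟨hp1, k1, hp2, hp3⟩ := hp
  obtain ⟨hq1, k2, hq2, hq3⟩ := hq
  have key : ∀ (a b : Int) (j1 j2 : Nat), a % 2 ≠ 0 → b % 2 ≠ 0 →
      a * 2 ^ j1 = b * 2 ^ j2 → j1 ≤ j2 → a = b ∧ j1 = j2 := by
    intro a b j1 j2 ha hb heq hle
    have hsplit : (2 : Int) ^ j2 = 2 ^ (j2 - j1) * 2 ^ j1 := by
      rw [← pow_add]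
      congr 1
      omega
    have heq2 : a * 2 ^ j1 = (b * 2 ^ (j2 - j1)) * 2 ^ j1 := by
      rw [heq, hsplit]
      ring
    have h2 : ((2:Int) ^ j1) ≠ 0 := by positivity
    have hcancel : a = b * 2 ^ (j2 - j1) := mul_right_cancel₀ h2 heq2
    rcases Nat.eq_zero_or_pos (j2 - j1) with hz | hpos
    · rw [hz] at hcancel
      simp at hcancel
      exact ⟨hcancel, by omega⟩
    · exfalso
      obtain ⟨c, hc⟩ : (2 : Int) ∣ 2 ^ (j2 - j1) := dvd_pow_self 2 (by omega)
      rw [hc] at hcancel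
      have : a = 2 * (b * c) := by rw [hcancel]; ring
      omega
  have heq : p.1 * 2 ^ k1 = q.1 * 2 ^ k2 := by rw [hp3, hq3]
  rcases le_total k1 k2 with hle | hle
  · obtain ⟨h1, h2⟩ := key p.1 q.1 k1 k2 hp1 hq1 heq hle
    exact Prod.ext h1 (by rw [hp2, hq2, h2])
  · obtain ⟨h1, h2⟩ := key q.1 p.1 k2 k1 hq1 hp1 heq.symm hle
    exact Prod.ext h1.symm (by rw [hp2, hq2, h2])

-- ===== VERDICT (by name: the statement is the Claim_ definition above) =====
theorem split_twos_spec : Claim_equal_split_twos := by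
  intro n _ hpre
  unfold Spec_split_twos
  exact good_unique n _ _ (A_good n hpre) (B_good n hpre)
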